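-- pv_equiv track=rewrite | github.com/vic942tor/Visual_estudio | Programación/Ejemplos/Ej17.py | is_magic_number
-- ===== SOURCE A (Python) =====
-- def is_magic_number(n):
--     # Calculamos el número de digitos
--     num_digits = len(str(n))
--
--     # Calculamos el número de factores
--     num_factors = 0
--     for i in range(1, n+1):
--         if n % i == 0:
--             num_factors += 1
--
--     # Calculamos el número de digitos que formarán parte de la suma de factores
--     sum_of_factors_digits = sum(int(digit) for digit in str(num_factors))
--
--     # Calculamos el número de digitos que formarán parte de la suma de digitos de cada dígito
--     sum_of_digits_digits = sum(int(digit) for digit in str(n))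
--
--     # Calculamos el número mágico
--     magic_number = sum_of_digits_digits * num_digits == sum_of_factors_digits * num_factors
--
--     return magic_number
-- ===== SOURCE B (Python) =====
-- def is_magic_number(n):
--     s = str(n)
--     num_digits = len(s)
--
--     # Count divisors in O(sqrt(n)): each divisor i <= sqrt(n) pairs with n // i.
--     num_factors = 0
--     i = 1
--     while i * i <= n:
--         if n % i == 0:
--             num_factors += 1 if i == n // i else 2
--         i += 1
--
--     sum_of_factors_digits = sum(int(digit) for digit in str(num_factors))
--     sum_of_digits_digits = sum(int(digit) for digit in s)
--
--     return sum_of_digits_digits * num_digits == sum_of_factors_digits * num_factors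
-- ===== Notes on version B (the rewrite author's own statement) =====
-- stated objective: faster
-- what changed: The divisor count, A's scan of every i from 1 to n, is replaced by trial division up to sqrt(n) counting each divisor i together with its cofactor n//i; the digit sums are unchanged.
import Mathlib
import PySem

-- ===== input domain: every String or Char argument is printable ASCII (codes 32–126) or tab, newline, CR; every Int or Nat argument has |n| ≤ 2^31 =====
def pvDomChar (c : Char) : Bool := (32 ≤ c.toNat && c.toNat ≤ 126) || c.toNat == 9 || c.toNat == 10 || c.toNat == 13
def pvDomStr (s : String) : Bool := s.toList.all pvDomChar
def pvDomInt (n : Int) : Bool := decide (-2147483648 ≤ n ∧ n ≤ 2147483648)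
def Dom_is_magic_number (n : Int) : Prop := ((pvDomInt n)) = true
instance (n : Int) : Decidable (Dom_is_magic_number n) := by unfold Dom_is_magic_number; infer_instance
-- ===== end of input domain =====

-- B replaces A's O(n) divisor-counting scan by trial division up to √n pairing each
-- divisor i with n // i (objective: faster, asymptotic); everything else is unchanged.
-- Both Pythons raise ValueError on n < 0 (int('-')), excluded by Pre_.

-- sum(int(digit) for digit in s): int(digit) via PySem.Int.ofChars? on the single char;
-- getD 0 is only reached outside Pre_ (for n ≥ 0 every char of str(n) is a digit).
def pvDigitSum (cs : List Char) : Int :=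
  (cs.map (fun c => (PySem.Int.ofChars? [c]).getD 0)).sum

-- ===== PORT A =====
def is_magic_number (n : Int) : Bool :=
  let num_digits : Int := (PySem.Int.toChars n).length
  let num_factors : Int :=
    (PySem.List.pyRange 1 (n + 1) 1).foldl
      (fun acc i => if PySem.Int.mod n i == 0 then acc + 1 else acc) 0
  let sum_of_factors_digits := pvDigitSum (PySem.Int.toChars num_factors)
  let sum_of_digits_digits := pvDigitSum (PySem.Int.toChars n)
  decide (sum_of_digits_digits * num_digits = sum_of_factors_digits * num_factors)

-- ===== PORT B =====
-- while i * i <= n: …  (i increases; terminates because i ≤ i*i ≤ n while the guard holds)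
def pvAltLoop (n i acc : Int) : Int :=
  if h : i * i ≤ n then
    pvAltLoop n (i + 1)
      (if PySem.Int.mod n i == 0 then
        (if i == PySem.Int.floordiv n i then acc + 1 else acc + 2)
       else acc)
  else acc
termination_by (n + 1 - i).toNat
decreasing_by
  have hii : i ≤ i * i := by nlinarith [mul_self_nonneg (i - 1)]
  omega

def is_magic_number_alt (n : Int) : Bool :=
  let num_digits : Int := (PySem.Int.toChars n).length
  let num_factors : Int := pvAltLoop n 1 0
  let sum_of_factors_digits := pvDigitSum (PySem.Int.toChars num_factors)
  let sum_of_digits_digits := pvDigitSum (PySem.Int.toChars n)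
  decide (sum_of_digits_digits * num_digits = sum_of_factors_digits * num_factors)

-- ===== PRECONDITION & SPEC =====
-- Pre_ excludes n < 0: there BOTH Pythons raise ValueError (int('-') on the sign
-- character of str(n)).
def Pre_is_magic_number (n : Int) : Prop := 0 ≤ n
instance (n : Int) : Decidable (Pre_is_magic_number n) := by unfold Pre_is_magic_number; infer_instance
def pvWitness_is_magic_number : Int := (35)

def Spec_is_magic_number (n : Int) (out : Bool) : Prop := out = is_magic_number_alt n
instance (n : Int) (out : Bool) : Decidable (Spec_is_magic_number n out) := by unfold Spec_is_magic_number; infer_instance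

-- ===== CLAIM (what is proved, stated in full; the proofs are below) =====
def Claim_equal_is_magic_number : Prop := ∀ (n : Int), Dom_is_magic_number n → Pre_is_magic_number n → Spec_is_magic_number n (is_magic_number n)

-- ===== LEMMAS AND PROOFS =====

-- the divisors of n that the loop from index i has not yet counted: both the divisor
-- and its cofactor are still ≥ i
noncomputable def pvRest (n i : Int) : Finset Int :=
  (Finset.Icc 1 n).filter (fun d => d ∣ n ∧ i ≤ d ∧ i ≤ n / d)

lemma pvRest_empty (n i : Int) (hi : 1 ≤ i) (h : n < i * i) : pvRest n i = ∅ := by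
  apply Finset.filter_false_of_mem
  intro d hd
  simp only [Finset.mem_Icc] at hd
  rintro ⟨hdvd, hid, hidiv⟩
  have hd0 : 0 < d := by omega
  have hmul : d * (n / d) = n := Int.mul_ediv_cancel' hdvd
  nlinarith [mul_le_mul hid hidiv (by omega : (0:Int) ≤ i) (by omega : (0:Int) ≤ d)]

lemma pvRest_step_not_dvd (n i : Int) (hi : 1 ≤ i) (hdvd : ¬ i ∣ n) :
    pvRest n i = pvRest n (i + 1) := by
  unfold pvRest
  apply Finset.filter_congr
  intro d hd
  simp only [Finset.mem_Icc] at hd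
  constructor
  · rintro ⟨h1, h2, h3⟩
    refine ⟨h1, ?_, ?_⟩
    · rcases eq_or_lt_of_le h2 with h | h
      · exact absurd (h ▸ h1) hdvd
      · omega
    · rcases eq_or_lt_of_le h3 with h | h
      · exfalso
        have hmul : d * (n / d) = n := Int.mul_ediv_cancel' h1
        exact hdvd ⟨d, by rw [← hmul, ← h]; ring⟩
      · omega
  · rintro ⟨h1, h2, h3⟩
    exact ⟨h1, by omega, by omega⟩

lemma pvNdii (n i : Int) (hi : 1 ≤ i) (hguard : i * i ≤ n) (hdvd : i ∣ n) :
    n / (n / i) = i := by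
  have hmul : i * (n / i) = n := Int.mul_ediv_cancel' hdvd
  have hile : i ≤ n / i := by rw [Int.le_ediv_iff_mul_le (by omega)]; linarith
  exact Int.ediv_eq_of_eq_mul_left (by omega)
    (by rw [mul_comm]; exact (Int.ediv_mul_cancel hdvd).symm)

lemma pvRest_step_dvd (n i : Int) (hn : 0 ≤ n) (hi : 1 ≤ i) (hguard : i * i ≤ n)
    (hdvd : i ∣ n) :
    pvRest n i = insert i (insert (n / i) (pvRest n (i + 1))) := by
  have hi0 : 0 < i := hi
  have hmul : i * (n / i) = n := Int.mul_ediv_cancel' hdvd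
  have hile : i ≤ n / i := by rw [Int.le_ediv_iff_mul_le hi0]; linarith
  have hdiv_dvd : n / i ∣ n := ⟨i, (Int.ediv_mul_cancel hdvd).symm⟩
  have hndii : n / (n / i) = i := pvNdii n i hi hguard hdvd
  have hdivle : n / i ≤ n := Int.ediv_le_self i hn
  ext d
  simp only [pvRest, Finset.mem_filter, Finset.mem_Icc, Finset.mem_insert]
  constructor
  · rintro ⟨⟨hd1, hd2⟩, hdvd', hid, hidiv⟩
    by_cases hdi : d = i
    · exact Or.inl hdi
    by_cases hdni : d = n / i
    · exact Or.inr (Or.inl hdni)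
    refine Or.inr (Or.inr ⟨⟨hd1, hd2⟩, hdvd', by omega, ?_⟩)
    rcases eq_or_lt_of_le hidiv with h | h
    · exfalso
      apply hdni
      have hmuld : d * (n / d) = n := Int.mul_ediv_cancel' hdvd'
      have hdin : d * i = n := by rw [h]; exact hmuld
      rw [← hdin, Int.mul_ediv_cancel _ (by omega)]
    · omega
  · rintro (h | h | ⟨⟨hd1, hd2⟩, hdvd', hid, hidiv⟩)
    · subst h
      exact ⟨⟨by omega, by nlinarith⟩, hdvd, le_refl _, hile⟩
    · subst h
      exact ⟨⟨by omega, hdivle⟩, hdiv_dvd, hile, by rw [hndii]⟩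
    · exact ⟨⟨hd1, hd2⟩, hdvd', by omega, by omega⟩

lemma pvRest_not_mem_self (n i : Int) : i ∉ pvRest n (i + 1) := by
  simp only [pvRest, Finset.mem_filter]
  rintro ⟨-, -, hle, -⟩
  omega

lemma pvRest_not_mem_cof (n i : Int) (hi : 1 ≤ i) (hguard : i * i ≤ n) (hdvd : i ∣ n) :
    n / i ∉ pvRest n (i + 1) := by
  simp only [pvRest, Finset.mem_filter]
  rintro ⟨-, -, -, hle⟩
  rw [pvNdii n i hi hguard hdvd] at hle
  omega

lemma pvAltLoop_eq (n i acc : Int) (hn : 0 ≤ n) (hi : 1 ≤ i) :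
    pvAltLoop n i acc = acc + (pvRest n i).card := by
  rw [pvAltLoop]
  split
  · rename_i hguard
    have hii : i ≤ i * i := by nlinarith [mul_self_nonneg (i - 1)]
    rw [pvAltLoop_eq n (i + 1) _ hn (by omega)]
    by_cases hdvd : i ∣ n
    · have hmod : (PySem.Int.mod n i == 0) = true := by
        simp [(PySem.Int.mod_eq_zero_iff_dvd n i).mpr hdvd]
      have hfd : PySem.Int.floordiv n i = n / i :=
        PySem.Int.floordiv_eq_ediv_of_pos (by omega)
      rw [pvRest_step_dvd n i hn hi hguard hdvd]
      by_cases heq : i = n / i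
      · have hbeq : (i == PySem.Int.floordiv n i) = true := by simp [hfd, ← heq]
        rw [hmod, if_pos rfl, hbeq, if_pos rfl, ← heq, Finset.insert_idem,
            Finset.card_insert_of_notMem (pvRest_not_mem_self n i)]
        push_cast; ring
      · have hbeq : (i == PySem.Int.floordiv n i) = false := by
          simp only [hfd, beq_eq_false_iff_ne, ne_eq]; exact heq
        have hinotmem : i ∉ insert (n / i) (pvRest n (i + 1)) := by
          simp only [Finset.mem_insert]
          rintro (h | h)
          · exact heq h
          · exact pvRest_not_mem_self n i h
        rw [hmod, if_pos rfl, hbeq, if_neg (by simp),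
            Finset.card_insert_of_notMem hinotmem,
            Finset.card_insert_of_notMem (pvRest_not_mem_cof n i hi hguard hdvd)]
        push_cast; ring
    · have hmod : (PySem.Int.mod n i == 0) = false := by
        simp only [beq_eq_false_iff_ne, ne_eq, PySem.Int.mod_eq_zero_iff_dvd]
        exact hdvd
      rw [hmod, if_neg (by simp), pvRest_step_not_dvd n i hi hdvd]
  · rename_i hguard
    rw [pvRest_empty n i hi (by omega)]
    simp
termination_by (n + 1 - i).toNat
decreasing_by
  have hii : i ≤ i * i := by nlinarith [mul_self_nonneg (i - 1)]
  omega

lemma pvCount_eq (n : Int) (hn : 0 ≤ n) :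
    List.countP (fun i => PySem.Int.mod n i == 0) (PySem.List.pyRange 1 (n + 1) 1)
      = ((Finset.Icc 1 n).filter (fun d => d ∣ n)).card := by
  have hnodup : (PySem.List.pyRange 1 (n + 1) 1).Nodup := PySem.List.nodup_pyRange_one 1 (n + 1)
  rw [List.countP_eq_length_filter,
      ← List.toFinset_card_of_nodup (hnodup.filter _), List.toFinset_filter]
  congr 1
  ext d
  simp only [Finset.mem_filter, List.mem_toFinset, PySem.List.mem_pyRange_one,
    Finset.mem_Icc, beq_iff_eq, PySem.Int.mod_eq_zero_iff_dvd]
  constructor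
  · rintro ⟨⟨h1, h2⟩, h3⟩
    exact ⟨⟨h1, by omega⟩, h3⟩
  · rintro ⟨⟨h1, h2⟩, h3⟩
    exact ⟨⟨h1, by omega⟩, h3⟩

lemma pvRest_one (n : Int) (hn : 0 ≤ n) :
    pvRest n 1 = (Finset.Icc 1 n).filter (fun d => d ∣ n) := by
  unfold pvRest
  apply Finset.filter_congr
  intro d hd
  simp only [Finset.mem_Icc] at hd
  constructor
  · rintro ⟨h1, -, -⟩
    exact h1
  · intro h1
    refine ⟨h1, by omega, ?_⟩
    rw [Int.le_ediv_iff_mul_le (by omega)]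
    omega

-- ===== VERDICT (by name: the statement is the Claim_ definition above) =====
theorem is_magic_number_spec : Claim_equal_is_magic_number := by
  intro n _ hpre
  unfold Spec_is_magic_number is_magic_number is_magic_number_alt
  have hcount :
      (PySem.List.pyRange 1 (n + 1) 1).foldl
        (fun acc i => if PySem.Int.mod n i == 0 then acc + 1 else acc) 0
      = pvAltLoop n 1 0 := by
    rw [PySem.List.foldl_count_if, pvAltLoop_eq n 1 0 hpre (by omega),
        pvRest_one n hpre, zero_add, zero_add, pvCount_eq n hpre]
  rw [hcount]
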